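-- pv_equiv track=rewrite | github.com/MrBrantCode/unitest_baseline | mut_generate/mist_train_taco/taco_8494/solution.py | minimum_largest_clique_size
-- ===== SOURCE A (Python) =====
-- def minimum_largest_clique_size(n: int, m: int) -> int:
--     """
--     Calculate the minimum size of the largest clique in a graph with `n` nodes and `m` edges.
--
--     Parameters:
--     n (int): The number of nodes in the graph.
--     m (int): The number of edges in the graph.
--
--     Returns:
--     int: The minimum size of the largest clique.
--     """
--     def s1(n, m):
--         ga = n % m
--         gb = m - ga
--         sa = n // m + 1
--         sb = n // m
--         return ga * gb * sa * sb + ga * (ga - 1) * sa * sa // 2 + gb * (gb - 1) * sb * sb // 2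
--
--     def s(n, c):
--         l = 1
--         h = n + 1
--         while l + 1 < h:
--             m = l + (h - l) // 2
--             k = s1(n, m)
--             if k < c:
--                 l = m
--             else:
--                 h = m
--         return h
--
--     return s(n, m)
-- ===== SOURCE B (Python) =====
-- def minimum_largest_clique_size(n: int, m: int) -> int:
--     def s1(n, m):
--         ga = n % m
--         gb = m - ga
--         sa = n // m + 1
--         sb = n // m
--         return ga * gb * sa * sb + ga * (ga - 1) * sa * sa // 2 + gb * (gb - 1) * sb * sb // 2
--
--     for k in range(2, n + 2):
--         if s1(n, k) >= m:
--             return k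
--     return n + 1
-- ===== Notes on version B (the rewrite author's own statement) =====
-- stated objective: simpler
-- what changed: Replaced A's binary search over clique sizes by a forward linear scan that returns the first size m in [2, n+1] whose complete-multipartite edge count s1(n,m) reaches c (falling back to n+1); equivalent because s1 is monotone non-decreasing in m.
import Mathlib
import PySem

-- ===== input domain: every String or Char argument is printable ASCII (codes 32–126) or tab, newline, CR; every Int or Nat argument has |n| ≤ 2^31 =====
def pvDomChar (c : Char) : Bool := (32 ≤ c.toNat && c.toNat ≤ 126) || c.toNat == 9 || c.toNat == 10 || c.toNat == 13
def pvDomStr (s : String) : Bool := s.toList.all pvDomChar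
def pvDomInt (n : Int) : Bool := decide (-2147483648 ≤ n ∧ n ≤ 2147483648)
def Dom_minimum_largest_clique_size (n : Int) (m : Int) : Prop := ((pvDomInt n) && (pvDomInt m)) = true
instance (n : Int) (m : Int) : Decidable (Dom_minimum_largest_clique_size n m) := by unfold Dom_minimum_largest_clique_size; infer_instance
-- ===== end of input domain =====

-- B replaces A's binary search over [1, n+1] by a forward linear scan for the first
-- qualifying clique size (simpler; same results because the tested count is monotone).

-- ===== PORT A =====
-- A's inner helper s1 (shared verbatim by B's Python, so both ports use it)
def pvS1 (n m : Int) : Int :=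
  let ga := PySem.Int.mod n m
  let gb := m - ga
  let sa := PySem.Int.floordiv n m + 1
  let sb := PySem.Int.floordiv n m
  ga * gb * sa * sb + PySem.Int.floordiv (ga * (ga - 1) * sa * sa) 2
    + PySem.Int.floordiv (gb * (gb - 1) * sb * sb) 2

-- A's binary-search loop `while l + 1 < h: …`; the Nat fuel only makes the loop total
-- (the gap h - l shrinks every iteration, so the entry fuel n.toNat is never exhausted)
def pvLoopA (n c : Int) : Nat → Int → Int → Int
  | 0, _l, h => h
  | fuel + 1, l, h =>
    if l + 1 < h then
      let m := l + PySem.Int.floordiv (h - l) 2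
      if pvS1 n m < c then pvLoopA n c fuel m h else pvLoopA n c fuel l m
    else h

def minimum_largest_clique_size (n : Int) (m : Int) : Int := pvLoopA n m n.toNat 1 (n + 1)

-- ===== PORT B =====
-- B's loop `for k in range(2, n + 2): if s1(n, k) >= m: return k` / fall-through `return n + 1`;
-- the Nat fuel only makes the loop total (k advances by 1, so the entry fuel n.toNat suffices)
def pvScanB (n c : Int) : Nat → Int → Int
  | 0, _k => n + 1
  | fuel + 1, k =>
    if k < n + 2 then
      if c ≤ pvS1 n k then k else pvScanB n c fuel (k + 1)
    else n + 1

def minimum_largest_clique_size_alt (n : Int) (m : Int) : Int := pvScanB n m n.toNat 2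

-- ===== PRECONDITION & SPEC =====
def Spec_minimum_largest_clique_size (n : Int) (m : Int) (out : Int) : Prop := out = minimum_largest_clique_size_alt n m
instance (n : Int) (m : Int) (out : Int) : Decidable (Spec_minimum_largest_clique_size n m out) := by unfold Spec_minimum_largest_clique_size; infer_instance

-- ===== CLAIM (what is proved, stated in full; the proofs are below) =====
def Claim_equal_minimum_largest_clique_size : Prop := ∀ (n : Int) (m : Int), Dom_minimum_largest_clique_size n m → Spec_minimum_largest_clique_size n m (minimum_largest_clique_size n m)

-- ===== LEMMAS AND PROOFS =====

-- pvG n m = Σ_{t ≥ 1} max (n - t*m) 0, written as the recurrence the proof uses;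
-- it equals the number of within-part pairs of the balanced m-partition of n nodes.
def pvG (n m : Int) : Int :=
  if _h : 1 ≤ m ∧ m ≤ n then (n - m) + pvG (n - m) m else 0
termination_by n.toNat
decreasing_by omega

lemma pvG_nonneg (n m : Int) : 0 ≤ pvG n m := by
  fun_induction pvG n m with
  | case1 n h ih => omega
  | case2 n h => simp

lemma pvG_mono_n (m : Int) : ∀ N : Nat, ∀ n' n : Int, n'.toNat ≤ N → 0 ≤ n → n ≤ n' →
    pvG n m ≤ pvG n' m := by
  intro N
  induction N with
  | zero =>
    intro n' n hN h0 hle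
    have hn : n = n' := by omega
    simp [hn]
  | succ N ih =>
    intro n' n hN h0 hle
    by_cases hm : 1 ≤ m ∧ m ≤ n
    · conv_lhs => rw [pvG]
      rw [dif_pos hm]
      conv_rhs => rw [pvG]
      rw [dif_pos ⟨hm.1, show m ≤ n' by omega⟩]
      have := ih (n' - m) (n - m) (by omega) (by omega) (by omega)
      omega
    · conv_lhs => rw [pvG]
      rw [dif_neg hm]
      have := pvG_nonneg n' m
      omega

lemma pvG_anti_succ (m : Int) (hm : 1 ≤ m) : ∀ N : Nat, ∀ n : Int, n.toNat ≤ N → 0 ≤ n →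
    pvG n (m + 1) ≤ pvG n m := by
  intro N
  induction N with
  | zero =>
    intro n hN h0
    rw [pvG, dif_neg (by omega), pvG, dif_neg (by omega)]
  | succ N ih =>
    intro n hN h0
    by_cases hcond : m + 1 ≤ n
    · rw [pvG, dif_pos ⟨show (1:Int) ≤ m + 1 by omega, hcond⟩]
      conv_rhs => rw [pvG]
      rw [dif_pos ⟨hm, show m ≤ n by omega⟩]
      have h1 := ih (n - (m + 1)) (by omega) (by omega)
      have h2 := pvG_mono_n m N (n - m) (n - (m + 1)) (by omega) (by omega) (by omega)
      omega
    · rw [pvG, dif_neg (by omega)]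
      exact pvG_nonneg n m

lemma pvG_anti (n : Int) (h0 : 0 ≤ n) : ∀ j k : Int, 1 ≤ j → j ≤ k → pvG n k ≤ pvG n j := by
  intro j k hj hjk
  induction k, hjk using Int.le_induction with
  | base => exact le_refl _
  | succ k hk ih =>
    exact le_trans (pvG_anti_succ k (by omega) n.toNat n (le_refl _) h0) ih

-- closed form of the recurrence: 2·pvG n m = (n // m) * (n + n % m - m)
lemma pvG_closed : ∀ N : Nat, ∀ n m : Int, n.toNat ≤ N → 0 ≤ n → 1 ≤ m →
    2 * pvG n m = PySem.Int.floordiv n m * (n + PySem.Int.mod n m - m) := by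
  intro N
  induction N with
  | zero =>
    intro n m hN h0 hm
    have hn : n = 0 := by omega
    subst hn
    rw [pvG, dif_neg (by omega)]
    have : PySem.Int.floordiv 0 m = 0 := by
      rw [PySem.Int.floordiv_eq_ediv_of_pos (by omega)]; simp
    rw [this]; ring
  | succ N ih =>
    intro n m hN h0 hm
    have hm0 : (0 : Int) < m := hm
    have hqr := PySem.Int.floordiv_mul_add_mod n m
    by_cases hcond : m ≤ n
    · rw [pvG, dif_pos ⟨hm, hcond⟩]
      have hrec := ih (n - m) m (by omega) (by omega) hm
      -- floordiv (n-m) m = floordiv n m - 1 and mod (n-m) m = mod n m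
      have hr0 := PySem.Int.mod_nonneg n hm0
      have hrm := PySem.Int.mod_lt n hm0
      have hq' : PySem.Int.floordiv (n - m) m = PySem.Int.floordiv n m - 1 := by
        rw [PySem.Int.floordiv_eq_iff_of_pos hm0]
        constructor <;> nlinarith [hqr, hr0, hrm]
      have hm' : PySem.Int.mod (n - m) m = PySem.Int.mod n m := by
        have h2 := PySem.Int.floordiv_mul_add_mod (n - m) m
        rw [hq'] at h2
        nlinarith [h2, hqr]
      rw [hq', hm'] at hrec
      generalize hQ : PySem.Int.floordiv n m = q at *
      generalize hR : PySem.Int.mod n m = r at *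
      linear_combination hrec - hqr
    · rw [pvG, dif_neg (by omega)]
      have : PySem.Int.floordiv n m = 0 := by
        rw [PySem.Int.floordiv_eq_iff_of_pos hm0]; constructor <;> omega
      rw [this]; ring

-- closed form of s1: 2·s1(n,m) = n(n-1) - 2·pvG n m
lemma pvS1_closed (n m : Int) (h0 : 0 ≤ n) (hm : 1 ≤ m) :
    2 * pvS1 n m = n * (n - 1) - 2 * pvG n m := by
  have hm0 : (0 : Int) < m := hm
  have hG := pvG_closed n.toNat n m (le_refl _) h0 hm
  have hqr := PySem.Int.floordiv_mul_add_mod n m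
  have hr0 := PySem.Int.mod_nonneg n hm0
  have hrm := PySem.Int.mod_lt n hm0
  simp only [pvS1]
  rw [hG]
  generalize hQ : PySem.Int.floordiv n m = q at *
  generalize hR : PySem.Int.mod n m = r at *
  -- the two `// 2` are exact: r*(r-1) and (m-r)*(m-r-1) are even
  obtain ⟨u1, hu1⟩ := Int.even_mul_succ_self (r - 1)
  obtain ⟨u2, hu2⟩ := Int.even_mul_succ_self (m - r - 1)
  have ht1 : r * (r - 1) * (q + 1) * (q + 1) = 2 * (u1 * (q + 1) * (q + 1)) := by
    linear_combination (q + 1) * (q + 1) * hu1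
  have ht2 : (m - r) * (m - r - 1) * q * q = 2 * (u2 * q * q) := by
    linear_combination q * q * hu2
  rw [PySem.Int.floordiv_eq_ediv_of_pos (by omega : (0:Int) < 2),
      PySem.Int.floordiv_eq_ediv_of_pos (by omega : (0:Int) < 2)]
  have e1 : r * (r - 1) * (q + 1) * (q + 1) / 2 = u1 * (q + 1) * (q + 1) := by omega
  have e2 : (m - r) * (m - r - 1) * q * q / 2 = u2 * q * q := by omega
  rw [e1, e2]
  linear_combination (n + q * m + r - q - 1) * hqr - ht1 - ht2

lemma pvS1_mono (n : Int) (h0 : 0 ≤ n) (j k : Int) (hj : 1 ≤ j) (hjk : j ≤ k) :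
    pvS1 n j ≤ pvS1 n k := by
  have h1 := pvS1_closed n j h0 hj
  have h2 := pvS1_closed n k h0 (by omega)
  have h3 := pvG_anti n h0 j k hj hjk
  omega

-- the scan's fuel is irrelevant once it covers the remaining range
lemma pvScanB_fuel (n c : Int) : ∀ fuel fuel' : Nat, ∀ k : Int,
    (n + 2 - k).toNat ≤ fuel → (n + 2 - k).toNat ≤ fuel' →
    pvScanB n c fuel k = pvScanB n c fuel' k := by
  intro fuel
  induction fuel with
  | zero =>
    intro fuel' k h1 _
    cases fuel' with
    | zero => rfl
    | succ f' =>
      simp only [pvScanB]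
      rw [if_neg (by omega)]
  | succ f ih =>
    intro fuel' k h1 h2
    by_cases hk : k < n + 2
    · obtain ⟨f', rfl⟩ : ∃ f', fuel' = f' + 1 := ⟨fuel' - 1, by omega⟩
      by_cases hs : c ≤ pvS1 n k
      · simp only [pvScanB]
        rw [if_pos hk, if_pos hk, if_pos hs, if_pos hs]
      · simp only [pvScanB]
        rw [if_pos hk, if_pos hk, if_neg hs, if_neg hs]
        exact ih f' (k + 1) (by omega) (by omega)
    · cases fuel' with
      | zero => simp only [pvScanB]; rw [if_neg hk]
      | succ f' => simp only [pvScanB]; rw [if_neg hk, if_neg hk]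

-- the scan never stops on an interval where s1 < c
lemma pvScanB_skip (n c : Int) : ∀ fuel : Nat, ∀ fuel' : Nat, ∀ a b : Int,
    a ≤ b → b ≤ n + 2 → (n + 2 - a).toNat ≤ fuel → (n + 2 - b).toNat ≤ fuel' →
    (∀ j : Int, a ≤ j → j < b → pvS1 n j < c) →
    pvScanB n c fuel a = pvScanB n c fuel' b := by
  intro fuel
  induction fuel with
  | zero =>
    intro fuel' a b hab hb h1 h2 _
    have : a = b := by omega
    subst this
    exact pvScanB_fuel n c 0 fuel' a h1 h2
  | succ f ih =>
    intro fuel' a b hab hb h1 h2 hstop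
    by_cases heq : a = b
    · subst heq
      exact pvScanB_fuel n c (f + 1) fuel' a h1 h2
    · have ha : a < n + 2 := by omega
      have hs := hstop a (le_refl a) (by omega)
      simp only [pvScanB]
      rw [if_pos ha, if_neg (by omega)]
      exact ih fuel' (a + 1) b (by omega) hb (by omega) h2
        (fun j hj1 hj2 => hstop j (by omega) hj2)

-- once the search interval is (l, l+1], the scan decides at k = l + 1
lemma pvScanB_at_top (n c l : Int) (fuelS : Nat) (hl : 1 ≤ l) (hh : l + 1 ≤ n + 1)
    (hfs : (n + 2 - (l + 1)).toNat ≤ fuelS)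
    (hcross : l + 1 = n + 1 ∨ c ≤ pvS1 n (l + 1)) :
    l + 1 = pvScanB n c fuelS (l + 1) := by
  obtain ⟨f, rfl⟩ : ∃ f, fuelS = f + 1 := ⟨fuelS - 1, by omega⟩
  simp only [pvScanB]
  rw [if_pos (by omega)]
  rcases hcross with hc | hc
  · by_cases hs : c ≤ pvS1 n (l + 1)
    · rw [if_pos hs]
    · rw [if_neg hs]
      cases f with
      | zero => show l + 1 = n + 1; omega
      | succ f' =>
        simp only [pvScanB]
        rw [if_neg (by omega)]
        omega
  · rw [if_pos hc]

-- the binary search on (l, h] equals the scan started at l + 1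
lemma pvLoopA_eq_scan (n c : Int) (h0 : 0 ≤ n) : ∀ fuelL : Nat, ∀ fuelS : Nat, ∀ l h : Int,
    (h - l - 1).toNat ≤ fuelL → (n + 2 - (l + 1)).toNat ≤ fuelS →
    1 ≤ l → l < h → h ≤ n + 1 → (h = n + 1 ∨ c ≤ pvS1 n h) →
    pvLoopA n c fuelL l h = pvScanB n c fuelS (l + 1) := by
  intro fuelL
  induction fuelL with
  | zero =>
    intro fuelS l h hfl hfs hl hlh hh hcross
    have hhl : h = l + 1 := by omega
    subst hhl
    exact pvScanB_at_top n c l fuelS hl hh hfs hcross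
  | succ f ih =>
    intro fuelS l h hfl hfs hl hlh hh hcross
    by_cases hlt : l + 1 < h
    · have hmid : l < l + PySem.Int.floordiv (h - l) 2 ∧ l + PySem.Int.floordiv (h - l) 2 < h := by
        rw [PySem.Int.floordiv_eq_ediv_of_pos (by omega : (0:Int) < 2)]; omega
      simp only [pvLoopA]
      rw [if_pos hlt]
      set mid := l + PySem.Int.floordiv (h - l) 2 with hmiddef
      by_cases hk : pvS1 n mid < c
      · rw [if_pos hk]
        rw [ih ((n + 2 - (mid + 1)).toNat) mid h (by omega) (le_refl _) (by omega)
          hmid.2 hh hcross]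
        exact (pvScanB_skip n c fuelS ((n + 2 - (mid + 1)).toNat) (l + 1) (mid + 1)
          (by omega) (by omega) hfs (le_refl _)
          (fun j hj1 hj2 => lt_of_le_of_lt (pvS1_mono n h0 j mid (by omega) (by omega)) hk)).symm
      · rw [if_neg hk]
        exact ih fuelS l mid (by omega) hfs hl hmid.1 (by omega) (Or.inr (by omega))
    · simp only [pvLoopA]
      rw [if_neg hlt]
      have hhl : h = l + 1 := by omega
      subst hhl
      exact pvScanB_at_top n c l fuelS hl hh hfs hcross

-- ===== VERDICT (by name: the statement is the Claim_ definition above) =====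
theorem minimum_largest_clique_size_spec : Claim_equal_minimum_largest_clique_size := by
  intro n m _dom
  unfold Spec_minimum_largest_clique_size minimum_largest_clique_size minimum_largest_clique_size_alt
  by_cases h2 : 2 ≤ n
  · have key := pvLoopA_eq_scan n m (by omega) n.toNat n.toNat 1 (n + 1)
      (by omega) (by omega) (le_refl 1) (by omega) (le_refl _) (Or.inl rfl)
    simpa using key
  · -- n ≤ 1: the loop body never runs (returns n + 1) and the scan has at most one step
    by_cases h1 : n = 1
    · subst h1
      by_cases hs : m ≤ pvS1 1 2
      · simp [pvLoopA, pvScanB, hs]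
      · simp [pvLoopA, pvScanB, hs]
    · have hz : n.toNat = 0 := by omega
      rw [hz]
      rfl
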